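-- pv_equiv track=rewrite | github.com/kymibuilds/spanish-portal-scrapers | scrape.py | has_challenge
-- ===== SOURCE A (Python) =====
-- def has_challenge(content: str) -> bool:
--     lower = content.lower()
--     indicators = [
--         "challenge-platform", "just a moment", "cf-challenge", "cf_chl_opt",
--         "incapsula", "_incapsula_resource", "incident_id",
--         "human verification", "awswaf",
--         "g-recaptcha-response", 'class="g-recaptcha"', "captcha-delivery",
--         "hcaptcha-box", "capado_robots", "control robots",
--     ]
--     return any(i in lower for i in indicators)
-- ===== SOURCE B (Python) =====
-- INDICATORS = [
--     "challenge-platform", "just a moment", "cf-challenge", "cf_chl_opt",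
--     "incapsula", "_incapsula_resource", "incident_id",
--     "human verification", "awswaf",
--     "g-recaptcha-response", 'class="g-recaptcha"', "captcha-delivery",
--     "hcaptcha-box", "capado_robots", "control robots",
-- ]
--
-- def has_challenge(content: str) -> bool:
--     # single left-to-right scan: at each position test whether any indicator starts there
--     lower = content.lower()
--     for j in range(len(lower) + 1):
--         for ind in INDICATORS:
--             if lower.startswith(ind, j):
--                 return True
--     return False
-- ===== Notes on version B (the rewrite author's own statement) =====
-- stated objective: alternative
-- what changed: Replaces the k separate per-indicator substring-containment scans with one left-to-right scan over positions of the lowered text, testing at each position whether any indicator starts there.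
import Mathlib
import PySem

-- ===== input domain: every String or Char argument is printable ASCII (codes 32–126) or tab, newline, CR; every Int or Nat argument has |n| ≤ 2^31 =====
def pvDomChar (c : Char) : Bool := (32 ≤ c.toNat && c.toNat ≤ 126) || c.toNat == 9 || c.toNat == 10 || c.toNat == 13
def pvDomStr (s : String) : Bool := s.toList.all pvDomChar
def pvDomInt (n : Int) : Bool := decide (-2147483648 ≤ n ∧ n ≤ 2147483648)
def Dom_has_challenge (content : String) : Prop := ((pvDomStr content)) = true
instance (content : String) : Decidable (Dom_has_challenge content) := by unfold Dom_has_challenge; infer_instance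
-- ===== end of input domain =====

-- B replaces A's k separate "indicator in lower" substring scans by one left-to-right scan
-- over positions of the lowered text, testing at each position whether any indicator starts there (alternative, same cost).


def pvIndicators : List String :=
  ["challenge-platform", "just a moment", "cf-challenge", "cf_chl_opt",
   "incapsula", "_incapsula_resource", "incident_id",
   "human verification", "awswaf",
   "g-recaptcha-response", "class=\"g-recaptcha\"", "captcha-delivery",
   "hcaptcha-box", "capado_robots", "control robots"]

-- ===== PORT A =====
-- A: any(i in lower for i in indicators)
def has_challenge (content : String) : Bool :=
  let lower := PySem.Str.lower content
  pvIndicators.any (fun i => PySem.Str.isIn i lower)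

-- ===== PORT B =====
-- B: for j over positions of lower, test whether some indicator is a prefix of lower[j:];
-- the position loop is the structural recursion on the suffixes of the lowered char list.
def pvScan (inds : List (List Char)) : List Char → Bool
  | [] => inds.any (fun i => i.isPrefixOf ([] : List Char))
  | c :: t => inds.any (fun i => i.isPrefixOf (c :: t)) || pvScan inds t

def has_challenge_alt (content : String) : Bool :=
  pvScan (pvIndicators.map String.toList) (PySem.Str.lower content).toList

-- ===== PRECONDITION & SPEC =====
def Spec_has_challenge (content : String) (out : Bool) : Prop := out = has_challenge_alt content
instance (content : String) (out : Bool) : Decidable (Spec_has_challenge content out) := by unfold Spec_has_challenge; infer_instance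

-- ===== CLAIM (what is proved, stated in full; the proofs are below) =====
def Claim_equal_has_challenge : Prop := ∀ (content : String), Dom_has_challenge content → Spec_has_challenge content (has_challenge content)

-- ===== LEMMAS AND PROOFS =====
theorem pvScan_eq_true_iff (inds : List (List Char)) (s : List Char) :
    pvScan inds s = true ↔ ∃ i ∈ inds, i <:+: s := by
  induction s with
  | nil =>
    simp [pvScan, List.isPrefixOf_iff_prefix, List.infix_nil, List.prefix_nil]
  | cons c t ih =>
    simp only [pvScan, Bool.or_eq_true, List.any_eq_true, List.isPrefixOf_iff_prefix, ih,
      List.infix_cons_iff]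
    constructor
    · rintro (⟨i, hi, hp⟩ | ⟨i, hi, hs⟩)
      · exact ⟨i, hi, Or.inl hp⟩
      · exact ⟨i, hi, Or.inr hs⟩
    · rintro ⟨i, hi, hp | hs⟩
      · exact Or.inl ⟨i, hi, hp⟩
      · exact Or.inr ⟨i, hi, hs⟩

-- ===== VERDICT (by name: the statement is the Claim_ definition above) =====
theorem has_challenge_spec : Claim_equal_has_challenge := by
  intro content _
  unfold Spec_has_challenge has_challenge has_challenge_alt
  apply Bool.coe_iff_coe.mp
  rw [pvScan_eq_true_iff]
  simp only [List.any_eq_true, PySem.Str.isIn_iff_infix, List.mem_map]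
  constructor
  · rintro ⟨i, hi, h⟩; exact ⟨i.toList, ⟨i, hi, rfl⟩, h⟩
  · rintro ⟨l, ⟨i, hi, rfl⟩, h⟩; exact ⟨i, hi, h⟩
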